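-- pv_equiv track=rewrite | github.com/fshdnc/disease_normalization | src/sample.py | sample_format_mentions
-- ===== SOURCE A (Python) =====
-- def sample_format_mentions(sampled,corpus_names):
--     '''
--     Input:
--         sampled: list of (picked_pos, list_of_sampled_neg)
--     Output: list of (start,end,'mention')
--     '''
--     assert len(corpus_names) == len(sampled)
--     mention_list = []
--     start = 0
--     end = 0
--     for (picked_pos, sampled_neg),mention in zip(sampled,corpus_names):
--         can_no = len(picked_pos) + len(sampled_neg)
--         end = can_no + end
--         mention_list.append((start,end,mention))
--         start = end
--     return mention_list
-- ===== SOURCE B (Python) =====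
-- def sample_format_mentions(sampled, corpus_names):
--     '''
--     Input:
--         sampled: list of (picked_pos, list_of_sampled_neg)
--     Output: list of (start,end,'mention')
--     '''
--     assert len(corpus_names) == len(sampled)
--     sizes = [len(picked_pos) + len(sampled_neg) for (picked_pos, sampled_neg) in sampled]
--     ends = []
--     total = 0
--     for s in sizes:
--         total += s
--         ends.append(total)
--     starts = [0] + ends[:-1]
--     return list(zip(starts, ends, corpus_names))
-- ===== Notes on version B (the rewrite author's own statement) =====
-- stated objective: alternative
-- what changed: Replaces the single running-accumulator loop that carries (start, end) state with a three-stage prefix-sum decomposition: build the per-mention size list, compute cumulative end offsets, derive starts by shifting, then zip starts/ends/names.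
import Mathlib
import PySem

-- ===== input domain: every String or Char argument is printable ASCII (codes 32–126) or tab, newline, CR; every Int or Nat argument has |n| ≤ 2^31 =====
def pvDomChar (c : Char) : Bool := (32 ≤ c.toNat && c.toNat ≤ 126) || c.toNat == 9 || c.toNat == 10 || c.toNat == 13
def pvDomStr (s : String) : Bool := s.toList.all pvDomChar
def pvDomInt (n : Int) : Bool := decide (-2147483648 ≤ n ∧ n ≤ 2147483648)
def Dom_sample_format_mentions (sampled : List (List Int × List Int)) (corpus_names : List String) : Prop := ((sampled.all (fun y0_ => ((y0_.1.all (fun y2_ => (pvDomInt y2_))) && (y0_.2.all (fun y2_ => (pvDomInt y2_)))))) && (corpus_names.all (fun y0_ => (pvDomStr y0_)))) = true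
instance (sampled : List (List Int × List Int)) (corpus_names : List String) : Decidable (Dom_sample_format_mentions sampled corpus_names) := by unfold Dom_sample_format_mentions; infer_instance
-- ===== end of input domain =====

-- B replaces A's running (start,end) accumulator loop by a size-list + prefix-sum + zip decomposition; same O(n) cost, return values proved equal.


-- ===== PORT A =====
-- A: one loop over zip(sampled, corpus_names) carrying state (start, end, mention_list).
def sample_format_mentions (sampled : List (List Int × List Int)) (corpus_names : List String) : List (Int × Int × String) :=
  ((sampled.zip corpus_names).foldl
    (fun (st : Int × Int × List (Int × Int × String)) pm =>
      let can_no : Int := pm.1.1.length + pm.1.2.length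
      let e : Int := can_no + st.2.1
      (e, e, st.2.2 ++ [(st.1, e, pm.2)]))
    (0, 0, [])).2.2

-- ===== PORT B =====
-- B: sizes list, then prefix-sum ends (the `total`/`ends` loop of Source B), starts = 0 :: ends.dropLast, zip3.
def pvAccum (acc : Int) : List Int → List Int
  | [] => []
  | x :: xs => (acc + x) :: pvAccum (acc + x) xs

def pvZip3 : List Int → List Int → List String → List (Int × Int × String)
  | s :: ss, e :: es, m :: ms => (s, e, m) :: pvZip3 ss es ms
  | _, _, _ => []

def sample_format_mentions_alt (sampled : List (List Int × List Int)) (corpus_names : List String) : List (Int × Int × String) :=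
  let sizes : List Int := sampled.map (fun p => (p.1.length : Int) + p.2.length)
  let ends := pvAccum 0 sizes
  let starts := 0 :: ends.dropLast
  pvZip3 starts ends corpus_names

-- ===== PRECONDITION & SPEC =====
-- Pre_ excludes exactly the inputs where the Python assert fails (AssertionError): length mismatch.
def Pre_sample_format_mentions (sampled : List (List Int × List Int)) (corpus_names : List String) : Prop :=
  corpus_names.length = sampled.length
instance (sampled : List (List Int × List Int)) (corpus_names : List String) : Decidable (Pre_sample_format_mentions sampled corpus_names) := by unfold Pre_sample_format_mentions; infer_instance
def pvWitness_sample_format_mentions : (List (List Int × List Int)) × List String := ([([1, 2], [3]), ([], [4])], ["m1", "m2"])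

def Spec_sample_format_mentions (sampled : List (List Int × List Int)) (corpus_names : List String) (out : List (Int × Int × String)) : Prop := out = sample_format_mentions_alt sampled corpus_names
instance (sampled : List (List Int × List Int)) (corpus_names : List String) (out : List (Int × Int × String)) : Decidable (Spec_sample_format_mentions sampled corpus_names out) := by unfold Spec_sample_format_mentions; infer_instance

-- ===== CLAIM (what is proved, stated in full; the proofs are below) =====
def Claim_equal_sample_format_mentions : Prop := ∀ (sampled : List (List Int × List Int)) (corpus_names : List String), Dom_sample_format_mentions sampled corpus_names → Pre_sample_format_mentions sampled corpus_names → Spec_sample_format_mentions sampled corpus_names (sample_format_mentions sampled corpus_names)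

-- ===== LEMMAS AND PROOFS =====

-- reference shape: the list of (start, end, name) triples starting from offset t
def pvG (t : Int) : List ((List Int × List Int) × String) → List (Int × Int × String)
  | [] => []
  | pm :: rest =>
      (t, ((pm.1.1.length : Int) + pm.1.2.length) + t, pm.2) ::
        pvG (((pm.1.1.length : Int) + pm.1.2.length) + t) rest

lemma foldlA_eq_pvG (l : List ((List Int × List Int) × String)) :
    ∀ (t : Int) (acc : List (Int × Int × String)),
      (l.foldl
        (fun (st : Int × Int × List (Int × Int × String)) pm =>
          let can_no : Int := pm.1.1.length + pm.1.2.length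
          let e : Int := can_no + st.2.1
          (e, e, st.2.2 ++ [(st.1, e, pm.2)]))
        (t, t, acc)).2.2 = acc ++ pvG t l := by
  induction l with
  | nil => intro t acc; simp [pvG]
  | cons pm rest ih =>
      intro t acc
      simp only [List.foldl_cons, pvG]
      rw [ih]
      simp

lemma zip3_eq_pvG (ss : List (List Int × List Int)) :
    ∀ (ms : List String) (t : Int),
      pvZip3 (t :: (pvAccum t (ss.map (fun p => (p.1.length : Int) + p.2.length))).dropLast)
        (pvAccum t (ss.map (fun p => (p.1.length : Int) + p.2.length))) ms
      = pvG t (ss.zip ms) := by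
  induction ss with
  | nil => intro ms t; cases ms <;> simp [pvAccum, pvZip3, pvG]
  | cons p rest ih =>
      intro ms t
      cases ms with
      | nil => simp [pvAccum, pvZip3, pvG]
      | cons m ms' =>
          simp only [List.map_cons, pvAccum]
          cases rest with
          | nil =>
              cases ms' <;>
                simp [pvAccum, pvZip3, pvG, Int.add_comm]
          | cons q rest' =>
              have hne : pvAccum (t + ((p.1.length : Int) + p.2.length))
                  ((q :: rest').map (fun p => (p.1.length : Int) + p.2.length)) ≠ [] := by
                simp [pvAccum]
              rw [List.dropLast_cons_of_ne_nil hne]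
              simp only [pvZip3, pvG, List.zip_cons_cons]
              rw [ih ms' (t + ((p.1.length : Int) + p.2.length)),
                Int.add_comm ((p.1.length : Int) + (p.2.length : Int)) t]

-- ===== VERDICT (by name: the statement is the Claim_ definition above) =====
theorem sample_format_mentions_spec : Claim_equal_sample_format_mentions := by
  intro sampled corpus_names _ _
  show sample_format_mentions sampled corpus_names = sample_format_mentions_alt sampled corpus_names
  unfold sample_format_mentions sample_format_mentions_alt
  rw [foldlA_eq_pvG (sampled.zip corpus_names) 0 []]
  simp only [List.nil_append]
  exact (zip3_eq_pvG sampled corpus_names 0).symm
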